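-- pv_equiv track=rewrite | github.com/lucaski2/Competitive-Programming | CodeForcesCompleted/CircularLocal/main.py | validate_circle
-- ===== SOURCE A (Python) =====
-- def validate_circle(circle):
--     n = len(circle)
--     circle.insert(0, circle[n - 1])
--     circle.append(circle[1])
--     for i in range(1, n + 1):
--         if circle[i] > circle[i - 1] and circle[i] > circle[i + 1]:
--             continue
--         elif circle[i] < circle[i - 1] and circle[i] < circle[i + 1]:
--             continue
--         return False
--
--
--
--     return True
-- ===== SOURCE B (Python) =====
-- def validate_circle(circle):
--     n = len(circle)
--     circle.insert(0, circle[n - 1])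
--     circle.append(circle[1])
--     signs = [(b > a) - (b < a) for a, b in zip(circle, circle[1:])]
--     return 0 not in signs and signs[1:] == [-s for s in signs[:-1]]
-- ===== Notes on version B (the rewrite author's own statement) =====
-- stated objective: alternative
-- what changed: Instead of testing each position against both neighbours, B compresses the extended array to its word of comparison signs once and then decides validity by two whole-list operations: 0 is absent from the word and the word shifted by one equals its elementwise negation.
import Mathlib
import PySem

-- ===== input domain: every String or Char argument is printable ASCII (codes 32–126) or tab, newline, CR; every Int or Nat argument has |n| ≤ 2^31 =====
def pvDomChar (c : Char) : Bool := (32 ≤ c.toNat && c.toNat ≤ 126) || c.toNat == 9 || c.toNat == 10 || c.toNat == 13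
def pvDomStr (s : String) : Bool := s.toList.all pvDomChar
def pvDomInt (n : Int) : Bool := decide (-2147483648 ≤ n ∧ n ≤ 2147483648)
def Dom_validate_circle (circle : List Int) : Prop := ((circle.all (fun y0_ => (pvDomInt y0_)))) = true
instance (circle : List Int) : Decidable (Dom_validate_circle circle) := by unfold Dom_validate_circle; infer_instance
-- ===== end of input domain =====

-- B compresses the extended array to its word of comparison signs and decides validity by two
-- whole-list tests (no 0 in the word; word shifted by one = elementwise negation); same O(n) cost,
-- a different decomposition. Both A and B mutate their argument identically (insert front /
-- append); the equivalence proved here is about the RETURN value only.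

-- ===== PORT A =====
def pvExtremum (ext : List Int) (i : Int) : Bool :=
  match PySem.List.pyGet? ext i, PySem.List.pyGet? ext (i - 1), PySem.List.pyGet? ext (i + 1) with
  | some a, some b, some c => (a > b && a > c) || (a < b && a < c)
  | _, _, _ => false
def validate_circle (circle : List Int) : Bool :=
  match PySem.List.pyGet? circle ((circle.length : Int) - 1) with
  | none => false
  | some last =>
    match PySem.List.pyGet? (last :: circle) 1 with
    | none => false
    | some second =>
      (PySem.List.pyRange 1 ((circle.length : Int) + 1) 1).all
        (fun i => pvExtremum ((last :: circle) ++ [second]) i)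

-- ===== PORT B =====
-- (b > a) - (b < a) from Source B, on Int
def pvSign (a b : Int) : Int := (if b > a then 1 else 0) - (if b < a then 1 else 0)
def validate_circle_alt (circle : List Int) : Bool :=
  match PySem.List.pyGet? circle ((circle.length : Int) - 1) with
  | none => false
  | some last =>
    match PySem.List.pyGet? (last :: circle) 1 with
    | none => false
    | some second =>
      let ext := (last :: circle) ++ [second]
      let signs := (ext.zip ext.tail).map (fun p => pvSign p.1 p.2)
      decide ((0 : Int) ∉ signs) && decide (signs.drop 1 = signs.dropLast.map (fun s => -s))

-- ===== PRECONDITION & SPEC =====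
-- Pre_ excludes only the empty list, on which A (and B) raises IndexError (circle[n-1] with n = 0).
def Pre_validate_circle (circle : List Int) : Prop := circle ≠ []
instance (circle : List Int) : Decidable (Pre_validate_circle circle) := by unfold Pre_validate_circle; infer_instance
def pvWitness_validate_circle : List Int := [1, 5, 2]

def Spec_validate_circle (circle : List Int) (out : Bool) : Prop := out = validate_circle_alt circle
instance (circle : List Int) (out : Bool) : Decidable (Spec_validate_circle circle out) := by unfold Spec_validate_circle; infer_instance

-- ===== CLAIM (what is proved, stated in full; the proofs are below) =====
def Claim_equal_validate_circle : Prop := ∀ (circle : List Int), Dom_validate_circle circle → Pre_validate_circle circle → Spec_validate_circle circle (validate_circle circle)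

-- ===== LEMMAS AND PROOFS =====

lemma pv_core (a b c : Int) :
    (((b > a && b > c) || (b < a && b < c)) = true) ↔ (pvSign a b ≠ 0 ∧ pvSign b c = -pvSign a b) := by
  unfold pvSign; split_ifs <;> simp <;> omega

lemma pv_main (ext : List Int) (n : Nat) (hn : 1 ≤ n) (hlen : ext.length = n + 2) :
    ((PySem.List.pyRange 1 ((n : Int) + 1) 1).all (fun i => pvExtremum ext i))
    = (decide ((0 : Int) ∉ ((ext.zip ext.tail).map (fun p => pvSign p.1 p.2))) &&
       decide (((ext.zip ext.tail).map (fun p => pvSign p.1 p.2)).drop 1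
         = ((ext.zip ext.tail).map (fun p => pvSign p.1 p.2)).dropLast.map (fun s => -s))) := by
  set sig : Nat → Int := fun k => pvSign (ext.getD k 0) (ext.getD (k+1) 0) with hsig
  have hget : ∀ (m : Nat), m < n + 2 → PySem.List.pyGet? ext (m : Int) = some (ext.getD m 0) := by
    intro m hm
    have hlt : m < ext.length := by omega
    rw [PySem.List.pyGet?_natCast, List.getElem?_eq_getElem hlt]
    simp [List.getD_eq_getElem?_getD, List.getElem?_eq_getElem hlt]
  -- the sign word is (range (n+1)).map sig
  have hSeq : (ext.zip ext.tail).map (fun p => pvSign p.1 p.2) = (List.range (n+1)).map sig := by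
    apply List.ext_getElem
    · simp [hlen]
    · intro i h1 h2
      have hi : i < n + 1 := by simpa using h2
      have hi1 : i < ext.length := by omega
      have hi2 : i < ext.tail.length := by simp [hlen]; omega
      rw [List.getElem_map, List.getElem_zip, List.getElem_map, List.getElem_range]
      have e1 : ext.tail[i]'hi2 = ext[i+1]'(by omega) := List.getElem_tail _
      rw [e1, hsig]
      simp only []
      rw [List.getD_eq_getElem ext 0 hi1, List.getD_eq_getElem ext 0 (show i+1 < ext.length by omega)]
  -- pointwise: A's test at position 1+k is the sign condition at k
  have hpoint : ∀ (k : Nat), k < n →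
      (pvExtremum ext (1 + (k : Int)) = true ↔ (sig k ≠ 0 ∧ sig (k+1) = -sig k)) := by
    intro k hk
    have g1 : (1 : Int) + (k : Int) = (((k + 1 : Nat)) : Int) := by push_cast; omega
    have g2 : (((k + 1 : Nat)) : Int) - 1 = ((k : Nat) : Int) := by push_cast; omega
    have g3 : (((k + 1 : Nat)) : Int) + 1 = (((k + 2 : Nat)) : Int) := by push_cast; omega
    rw [pvExtremum, g1, g2, g3, hget (k+1) (by omega), hget k (by omega), hget (k+2) (by omega)]
    exact pv_core (ext.getD k 0) (ext.getD (k+1) 0) (ext.getD (k+2) 0)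
  -- A's all-loop as a quantifier over range n
  have hA : ((PySem.List.pyRange 1 ((n : Int) + 1) 1).all (fun i => pvExtremum ext i)) = true
      ↔ ∀ k < n, (sig k ≠ 0 ∧ sig (k+1) = -sig k) := by
    rw [PySem.List.pyRange_one 1 ((n : Int) + 1)]
    have hn1 : ((n : Int) + 1 - 1).toNat = n := by omega
    rw [hn1, List.all_map, List.all_eq_true]
    constructor
    · intro h k hk
      have := h k (List.mem_range.mpr hk)
      rw [← hpoint k hk]
      simpa using this
    · intro h k hk
      have hk' : k < n := List.mem_range.mp hk
      simpa using (hpoint k hk').mpr (h k hk')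
  -- B's two tests as quantifiers
  have hB1 : ((0 : Int) ∉ ((ext.zip ext.tail).map (fun p => pvSign p.1 p.2)))
      ↔ ∀ k < n + 1, sig k ≠ 0 := by
    rw [hSeq]
    simp only [List.mem_map, List.mem_range, not_exists]
    constructor
    · intro h k hk hz
      exact h k ⟨hk, hz⟩
    · rintro h k ⟨hk, hz⟩
      exact h k hk hz
  have hdrop : ((List.range (n+1)).map sig).drop 1 = (List.range n).map (fun k => sig (k+1)) := by
    rw [List.range_succ_eq_map, List.map_cons, List.drop_one, List.tail_cons, List.map_map]
    rfl
  have hdl : ((List.range (n+1)).map sig).dropLast.map (fun s => -s)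
      = (List.range n).map (fun k => -(sig k)) := by
    rw [List.range_succ, List.map_append, List.map_singleton, List.dropLast_concat, List.map_map]
    rfl
  have hB2 : (((ext.zip ext.tail).map (fun p => pvSign p.1 p.2)).drop 1
        = ((ext.zip ext.tail).map (fun p => pvSign p.1 p.2)).dropLast.map (fun s => -s))
      ↔ ∀ k < n, sig (k+1) = -sig k := by
    rw [hSeq, hdrop, hdl, List.map_eq_map_iff]
    constructor
    · intro h k hk; exact h k (List.mem_range.mpr hk)
    · intro h k hk; exact h k (List.mem_range.mp hk)
  -- bridge: the last sign's nonzeroness follows from the alternation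
  rw [Bool.eq_iff_iff, hA]
  rw [show (decide ((0 : Int) ∉ ((ext.zip ext.tail).map (fun p => pvSign p.1 p.2))) &&
       decide (((ext.zip ext.tail).map (fun p => pvSign p.1 p.2)).drop 1
         = ((ext.zip ext.tail).map (fun p => pvSign p.1 p.2)).dropLast.map (fun s => -s))) = true
      ↔ ((0 : Int) ∉ ((ext.zip ext.tail).map (fun p => pvSign p.1 p.2))) ∧
        (((ext.zip ext.tail).map (fun p => pvSign p.1 p.2)).drop 1
         = ((ext.zip ext.tail).map (fun p => pvSign p.1 p.2)).dropLast.map (fun s => -s))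
      from by simp]
  rw [hB1, hB2]
  constructor
  · intro h
    refine ⟨?_, fun k hk => (h k hk).2⟩
    intro k hk
    by_cases hkn : k < n
    · exact (h k hkn).1
    · have hkeq : k = n := by omega
      obtain ⟨hnz, halt⟩ := h (n - 1) (by omega)
      have hrw : n - 1 + 1 = n := by omega
      rw [hrw] at halt
      rw [hkeq, halt]
      intro hc
      apply hnz
      omega
  · intro ⟨h1, h2⟩ k hk
    exact ⟨h1 k (by omega), h2 k hk⟩

lemma pv_ports_eq (circle : List Int) : validate_circle circle = validate_circle_alt circle := by
  unfold validate_circle validate_circle_alt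
  cases h1 : PySem.List.pyGet? circle ((circle.length : Int) - 1) with
  | none => rfl
  | some last =>
    simp only []
    cases h2 : PySem.List.pyGet? (last :: circle) 1 with
    | none => rfl
    | some second =>
      have hne : circle ≠ [] := by
        intro hc; subst hc; simp [PySem.List.pyGet?] at h1
      have hn : 1 ≤ circle.length := List.length_pos_iff.mpr hne
      exact pv_main ((last :: circle) ++ [second]) circle.length hn (by simp)

-- ===== VERDICT (by name: the statement is the Claim_ definition above) =====
theorem validate_circle_spec : Claim_equal_validate_circle := by
  intro circle _ _
  unfold Spec_validate_circle
  exact pv_ports_eq circle
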